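-- pv_equiv track=rewrite | github.com/andrewc3GH/competitive-programming | USACO-Bronze:Training-python firsthalf/USACO-barn1/main.py | calculate
-- ===== SOURCE A (Python) =====
-- def calculate(M, S, C, valueLst):
--   gapLst = []
--   for i in range(1, len(valueLst)):
--     if valueLst[i] > (valueLst[i - 1] + 1):
--       gapLst.append(valueLst[i] - valueLst[i - 1] - 1)
--   gapLst.sort()
--   gapLst.reverse()
--   gapSpace = 0
--   if len(gapLst) < (M - 1):
--     for i in range(len(gapLst)):
--       gapSpace += gapLst[i]
--   else:
--     for i in range(M - 1):
--       gapSpace += gapLst[i]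
--   gapSpace += (valueLst[0] - 1)
--   gapSpace += (S - (valueLst[len(valueLst) - 1] + 1))
--   return gapSpace
-- ===== SOURCE B (Python) =====
-- def calculate(M, S, C, valueLst):
--     gaps = [valueLst[i] - valueLst[i - 1] - 1
--             for i in range(1, len(valueLst))
--             if valueLst[i] > valueLst[i - 1] + 1]
--     return _top_sum(M - 1, gaps) + (valueLst[0] - 1) + (S - (valueLst[-1] + 1))
--
--
-- def _top_sum(k, xs):
--     """Sum of the min(k, len(xs)) largest elements of xs, by quickselect-style
--     three-way partitioning, without sorting."""
--     if k <= 0 or not xs: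
--         return 0
--     p = xs[0]
--     big = [x for x in xs if x > p]
--     small = [x for x in xs if x < p]
--     neq = len(xs) - len(big) - len(small)
--     if k <= len(big):
--         return _top_sum(k, big)
--     if k <= len(big) + neq:
--         return sum(big) + (k - len(big)) * p
--     return sum(big) + neq * p + _top_sum(k - len(big) - neq, small)
-- ===== Notes on version B (the rewrite author's own statement) =====
-- stated objective: alternative
-- what changed: Replaced sort-descending-then-index-loop over the gap list by a quickselect-style three-way-partition recursion that sums the M-1 largest gaps without sorting (measured ~1.3x, below the 1.5x bar, so not claimed as faster).
-- outside the precondition, e.g. on calculate(2, 10, 0, []): A raises IndexError, B raises IndexError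
import Mathlib
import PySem

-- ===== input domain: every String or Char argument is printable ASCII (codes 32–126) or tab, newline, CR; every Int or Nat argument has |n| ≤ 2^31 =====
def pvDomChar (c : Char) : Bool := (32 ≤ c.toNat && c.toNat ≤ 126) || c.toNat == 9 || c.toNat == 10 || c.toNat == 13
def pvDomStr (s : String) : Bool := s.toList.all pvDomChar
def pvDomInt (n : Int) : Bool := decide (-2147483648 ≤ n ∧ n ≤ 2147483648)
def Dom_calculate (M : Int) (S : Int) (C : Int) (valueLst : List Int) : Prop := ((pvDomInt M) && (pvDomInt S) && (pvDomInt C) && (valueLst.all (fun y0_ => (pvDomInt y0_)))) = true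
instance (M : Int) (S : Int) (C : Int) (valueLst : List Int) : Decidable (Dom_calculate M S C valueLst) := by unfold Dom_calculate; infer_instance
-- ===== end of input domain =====

-- B replaces sort-descending-then-index-loop by a quickselect-style three-way-partition
-- recursion summing the M-1 largest gaps without sorting (alternative algorithm).
-- Pre_ excludes the empty stall list, on which Python A raises IndexError (B raises too).

-- ===== PORT A =====
def calculate (M : Int) (S : Int) (C : Int) (valueLst : List Int) : Int :=
  let gapLst : List Int :=
    (PySem.List.pyRange 1 (PySem.List.len valueLst)).foldl
      (fun acc i =>
        if PySem.List.pyGetD valueLst i 0 > PySem.List.pyGetD valueLst (i - 1) 0 + 1 then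
          acc ++ [PySem.List.pyGetD valueLst i 0 - PySem.List.pyGetD valueLst (i - 1) 0 - 1]
        else acc) []
  let gapLst : List Int := (PySem.List.sorted gapLst (fun x => x)).reverse
  let gapSpace : Int := 0
  let gapSpace : Int :=
    if (gapLst.length : Int) < M - 1 then
      (PySem.List.pyRange 0 (PySem.List.len gapLst)).foldl
        (fun g i => g + PySem.List.pyGetD gapLst i 0) gapSpace
    else
      (PySem.List.pyRange 0 (M - 1)).foldl
        (fun g i => g + PySem.List.pyGetD gapLst i 0) gapSpace
  let gapSpace := gapSpace + (PySem.List.pyGetD valueLst 0 0 - 1)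
  let gapSpace := gapSpace + (S - (PySem.List.pyGetD valueLst (PySem.List.len valueLst - 1) 0 + 1))
  gapSpace

-- ===== PORT B =====
-- sum of the min(k, len xs) largest elements of xs (Source B's _top_sum)
def topSum (k : Int) (xs : List Int) : Int :=
  if h : k ≤ 0 ∨ xs = [] then 0
  else
    let p := xs.headD 0
    let big := xs.filter (fun x => p < x)
    let small := xs.filter (fun x => x < p)
    let neq : Int := (xs.length : Int) - big.length - small.length
    if k ≤ (big.length : Int) then topSum k big
    else if k ≤ (big.length : Int) + neq then big.sum + (k - big.length) * p
    else big.sum + neq * p + topSum (k - big.length - neq) small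
termination_by xs.length
decreasing_by
  all_goals
    rw [List.length_unattach, ← List.length_attach (l := xs)]
    refine List.length_filter_lt_length_iff_exists.mpr ?_
    push Not at h
    cases xs with
    | nil => exact absurd rfl h.2
    | cons a t => exact ⟨⟨a, List.mem_cons_self⟩, List.mem_attach _ _, by simp⟩

def calculate_alt (M : Int) (S : Int) (C : Int) (valueLst : List Int) : Int :=
  let gaps : List Int :=
    ((PySem.List.pyRange 1 (PySem.List.len valueLst)).filter
        (fun i => PySem.List.pyGetD valueLst i 0 > PySem.List.pyGetD valueLst (i - 1) 0 + 1)).map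
      (fun i => PySem.List.pyGetD valueLst i 0 - PySem.List.pyGetD valueLst (i - 1) 0 - 1)
  topSum (M - 1) gaps + (PySem.List.pyGetD valueLst 0 0 - 1)
    + (S - (PySem.List.pyGetD valueLst (-1) 0 + 1))

-- ===== PRECONDITION & SPEC =====
-- Python A raises IndexError on the empty stall list (valueLst[0]); B raises there too.
def Pre_calculate (M : Int) (S : Int) (C : Int) (valueLst : List Int) : Prop := valueLst ≠ []
instance (M : Int) (S : Int) (C : Int) (valueLst : List Int) : Decidable (Pre_calculate M S C valueLst) := by unfold Pre_calculate; infer_instance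
def pvWitness_calculate : Int × Int × Int × List Int := (3, 20, 4, ([1, 4, 9, 10] : List Int))

def Spec_calculate (M : Int) (S : Int) (C : Int) (valueLst : List Int) (out : Int) : Prop := out = calculate_alt M S C valueLst
instance (M : Int) (S : Int) (C : Int) (valueLst : List Int) (out : Int) : Decidable (Spec_calculate M S C valueLst out) := by unfold Spec_calculate; infer_instance

-- ===== CLAIM (what is proved, stated in full; the proofs are below) =====
def Claim_equal_calculate : Prop := ∀ (M : Int) (S : Int) (C : Int) (valueLst : List Int), Dom_calculate M S C valueLst → Pre_calculate M S C valueLst → Spec_calculate M S C valueLst (calculate M S C valueLst)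

-- ===== LEMMAS AND PROOFS =====

def dsort (xs : List Int) : List Int := (PySem.List.sorted xs (fun x => x)).reverse

lemma dsort_perm (xs : List Int) : (dsort xs).Perm xs :=
  (List.reverse_perm _).trans (PySem.List.sorted_perm xs (fun x => x) false)

lemma dsort_pairwise (xs : List Int) : (dsort xs).Pairwise (fun a b => b ≤ a) :=
  List.pairwise_reverse.mpr (PySem.List.sorted_pairwise xs (fun x => x))

lemma dsort_unique {xs ys : List Int} (hp : ys.Perm xs)
    (hs : ys.Pairwise (fun a b : Int => b ≤ a)) : dsort xs = ys :=
  List.eq_of_perm_of_sorted (fun _ _ _ _ h1 h2 => le_antisymm h2 h1)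
    (dsort_pairwise xs) hs ((dsort_perm xs).trans hp.symm)

lemma count_partition (p : Int) (xs : List Int) :
    xs.length = (xs.filter (fun x => p < x)).length + (xs.filter (fun x => x < p)).length
      + xs.count p := by
  induction xs with
  | nil => simp
  | cons a t ih =>
    rcases lt_trichotomy p a with h | h | h <;>
      simp [h, ne_of_gt, ne_of_lt, not_lt_of_gt, ih] <;> omega

lemma count_filter_neg {p : Int → Bool} {a : Int} {l : List Int} (h : p a = false) :
    (l.filter p).count a = 0 :=
  List.count_eq_zero.mpr (fun hm => by
    have := List.of_mem_filter hm; rw [h] at this; exact Bool.false_ne_true this)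

lemma dsort_decomp (p : Int) (xs : List Int) :
    dsort xs = dsort (xs.filter (fun x => p < x))
      ++ List.replicate (xs.count p) p ++ dsort (xs.filter (fun x => x < p)) := by
  apply dsort_unique
  · rw [List.perm_iff_count]
    intro a
    have hb := (dsort_perm (xs.filter (fun x => p < x))).count_eq a
    have hs := (dsort_perm (xs.filter (fun x => x < p))).count_eq a
    rcases lt_trichotomy p a with h | h | h
    · have h1 : List.count a (xs.filter (fun x => p < x)) = List.count a xs :=
        List.count_filter (by simpa using h)
      have h2 : List.count a (xs.filter (fun x => x < p)) = 0 :=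
        count_filter_neg (by simpa using not_lt_of_gt h)
      simp [List.count_append, hb, hs, h1, h2, List.count_replicate]
      exact fun e => absurd e (ne_of_lt h)
    · subst h
      have h1 : List.count p (xs.filter (fun x => p < x)) = 0 :=
        count_filter_neg (by simp)
      have h2 : List.count p (xs.filter (fun x => x < p)) = 0 :=
        count_filter_neg (by simp)
      simp [List.count_append, hb, hs, h1, h2, List.count_replicate]
    · have h1 : List.count a (xs.filter (fun x => p < x)) = 0 :=
        count_filter_neg (by simpa using not_lt_of_gt h)
      have h2 : List.count a (xs.filter (fun x => x < p)) = List.count a xs :=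
        List.count_filter (by simpa using h)
      simp [List.count_append, hb, hs, h1, h2, List.count_replicate]
      exact fun e => absurd e.symm (ne_of_lt h)
  · refine List.pairwise_append.mpr ⟨List.pairwise_append.mpr
      ⟨dsort_pairwise _, ?_, ?_⟩, dsort_pairwise _, ?_⟩
    · exact List.pairwise_replicate.mpr (Or.inr le_rfl)
    · intro a ha b hb
      have ha' : p < a := by
        have := (dsort_perm _).mem_iff.mp ha
        simpa using (List.mem_filter.mp this).2
      rw [List.eq_of_mem_replicate hb]
      exact le_of_lt ha'
    · intro a ha b hb
      have hb' : b < p := by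
        have := (dsort_perm _).mem_iff.mp hb
        simpa using (List.mem_filter.mp this).2
      rcases List.mem_append.mp ha with h | h
      · have : p < a := by
          have := (dsort_perm _).mem_iff.mp h
          simpa using (List.mem_filter.mp this).2
        exact le_of_lt (lt_trans hb' this)
      · rw [List.eq_of_mem_replicate h]
        exact le_of_lt hb' 

lemma length_dsort (xs : List Int) : (dsort xs).length = xs.length := by
  simp [dsort, PySem.List.length_sorted]

lemma sum_dsort (xs : List Int) : (dsort xs).sum = xs.sum := (dsort_perm xs).sum_eq


lemma filter_head_length_lt (xs : List Int) (hne : xs ≠ []) (q : Int → Bool)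
    (hq : q (xs.headD 0) = false) : (xs.filter q).length < xs.length := by
  refine List.length_filter_lt_length_iff_exists.mpr ⟨xs.headD 0, ?_, by simpa [← List.headD_eq_head?_getD] using hq⟩
  cases xs with
  | nil => exact absurd rfl hne
  | cons a t => exact List.mem_cons_self

lemma topSum_eq_aux (n : Nat) : ∀ (k : Int) (xs : List Int), xs.length ≤ n →
    topSum k xs = ((dsort xs).take k.toNat).sum := by
  induction n with
  | zero =>
    intro k xs hlen
    have hx : xs = [] := List.length_eq_zero_iff.mp (Nat.le_zero.mp hlen)
    rw [topSum, dif_pos (Or.inr hx)]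
    simp [hx, dsort, show PySem.List.sorted ([] : List Int) (fun x => x) = [] from rfl]
  | succ n ih =>
    intro k xs hlen
    rw [topSum]
    by_cases h : k ≤ 0 ∨ xs = []
    · rw [dif_pos h]
      rcases h with h | h
      · simp [Int.toNat_of_nonpos h]
      · simp [h, dsort, show PySem.List.sorted ([] : List Int) (fun x => x) = [] from rfl]
    · rw [dif_neg h]
      have hne : xs ≠ [] := fun e => h (Or.inr e)
      set p := xs.headD 0 with hp
      set big := xs.filter (fun x => p < x) with hbig
      set small := xs.filter (fun x => x < p) with hsmall
      have hblt : big.length < xs.length :=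
        filter_head_length_lt xs hne _ (by simp [hp])
      have hslt : small.length < xs.length :=
        filter_head_length_lt xs hne _ (by simp [hp])
      have hcnt : (xs.length : Int) - big.length - small.length = (xs.count p : Int) := by
        have := count_partition p xs
        rw [← hbig, ← hsmall] at this
        omega
      rw [dsort_decomp p xs]
      by_cases hk1 : k ≤ (big.length : Int)
      · rw [if_pos hk1, ih k big (by omega)]
        have hlen2 : k.toNat ≤ (dsort big).length := by rw [length_dsort]; omega
        rw [List.append_assoc, List.take_append_of_le_length hlen2]
      · rw [if_neg hk1]
        have hlen2 : (dsort big).length ≤ k.toNat := by rw [length_dsort]; omega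
        rw [List.append_assoc, List.take_append,
          List.take_of_length_le hlen2, List.take_append,
          List.take_replicate, List.sum_append, List.sum_append,
          List.sum_replicate, sum_dsort, length_dsort, List.length_replicate]
        by_cases hk2 : k ≤ (big.length : Int) + ((xs.length : Int) - big.length - small.length)
        · rw [if_pos hk2]
          have h1 : min (k.toNat - big.length) (xs.count p) = k.toNat - big.length := by omega
          have h2 : k.toNat - big.length - xs.count p = 0 := by omega
          rw [h1, h2]
          simp [dsort]
          have : ((k.toNat - big.length : Nat) : Int) = k - big.length := by omega
          rw [this]
        · rw [if_neg hk2, ih _ small (by omega)]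
          have h1 : min (k.toNat - big.length) (xs.count p) = xs.count p := by omega
          have h2 : k.toNat - big.length - xs.count p
              = (k - big.length - ((xs.length : Int) - big.length - small.length)).toNat := by omega
          rw [h1, h2]
          simp only [nsmul_eq_mul]
          rw [hcnt]
          ring

lemma topSum_eq (k : Int) (xs : List Int) :
    topSum k xs = ((dsort xs).take k.toNat).sum := topSum_eq_aux xs.length k xs le_rfl

lemma foldl_sum_take (L : List Int) (t : Nat) (ht : t ≤ L.length) :
    (PySem.List.pyRange 0 (t : Int)).foldl (fun g i => g + PySem.List.pyGetD L i 0) 0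
      = (L.take t).sum := by
  induction t with
  | zero => rfl
  | succ t ih =>
    have : ((t + 1 : Nat) : Int) = (t : Int) + 1 := by omega
    rw [this, PySem.List.pyRange_one_succ_right (by omega), List.foldl_append]
    simp only [List.foldl_cons, List.foldl_nil]
    have hget : L[t]? = some L[t] := List.getElem?_eq_getElem (by omega)
    rw [ih (by omega), PySem.List.pyGetD_natCast, List.getD_eq_getElem?_getD, hget]
    have htake : List.take (t + 1) L = List.take t L ++ [L[t]] := by
      rw [List.take_add_one, hget]
      rfl
    rw [htake, List.sum_append]
    simp

lemma pyRange_zero_nonpos (b : Int) (hb : b ≤ 0) : PySem.List.pyRange 0 b = [] := by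
  simp only [PySem.List.pyRange, if_neg (by norm_num : ¬ (1:Int) = 0)]
  rw [if_pos (by norm_num : (0:Int) < 1), if_neg (by omega : ¬ (0:Int) < b)]
  simp

theorem calc_eq (M S C : Int) (v : List Int) (hv : v ≠ []) :
    calculate M S C v = calculate_alt M S C v := by
  have hvlen : 1 ≤ v.length := List.length_pos_iff.mpr hv
  simp only [calculate, calculate_alt]
  -- the gap lists agree
  have hfold := PySem.List.foldl_append_if
    (fun i => decide (PySem.List.pyGetD v i 0 > PySem.List.pyGetD v (i - 1) 0 + 1))
    (fun i => PySem.List.pyGetD v i 0 - PySem.List.pyGetD v (i - 1) 0 - 1)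
    (PySem.List.pyRange 1 (PySem.List.len v)) []
  simp only [decide_eq_true_eq, List.nil_append] at hfold
  rw [hfold]
  set G : List Int :=
    ((PySem.List.pyRange 1 (PySem.List.len v)).filter
        (fun i => decide (PySem.List.pyGetD v i 0 > PySem.List.pyGetD v (i - 1) 0 + 1))).map
      (fun i => PySem.List.pyGetD v i 0 - PySem.List.pyGetD v (i - 1) 0 - 1) with hG
  have hL : (PySem.List.sorted G (fun x => x)).reverse = dsort G := rfl
  rw [hL]
  set L := dsort G with hLdef
  -- last element
  have hlast : PySem.List.pyGetD v (PySem.List.len v - 1) 0 = PySem.List.pyGetD v (-1) 0 := by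
    rw [PySem.List.pyGetD_neg_one v 0 hv]
    have h1 : PySem.List.len v - 1 = ((v.length - 1 : Nat) : Int) := by
      rw [PySem.List.len_eq]; omega
    rw [h1, PySem.List.pyGetD_natCast, List.getD_eq_getElem?_getD,
      List.getElem?_eq_getElem (by omega), List.getLast_eq_getElem]
    simp
  rw [hlast]
  -- sum branch = topSum
  have hsum :
      (if (L.length : Int) < M - 1 then
        (PySem.List.pyRange 0 (PySem.List.len L)).foldl
          (fun g i => g + PySem.List.pyGetD L i 0) 0
      else
        (PySem.List.pyRange 0 (M - 1)).foldl
          (fun g i => g + PySem.List.pyGetD L i 0) 0)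
      = topSum (M - 1) G := by
    rw [topSum_eq, ← hLdef]
    by_cases hb : (L.length : Int) < M - 1
    · rw [if_pos hb, PySem.List.foldl_pyRange_pyGetD L 0 (fun g x => g + x) 0 le_rfl]
      rw [List.take_of_length_le (by omega)]
      simp
      rw [PySem.List.foldl_add L (fun x => x) 0]
      simp
    · rw [if_neg hb]
      by_cases hm : M - 1 ≤ 0
      · rw [pyRange_zero_nonpos _ hm]
        simp [Int.toNat_of_nonpos hm]
      · have ht : M - 1 = (((M - 1).toNat : Nat) : Int) := by omega
        rw [ht, foldl_sum_take L (M - 1).toNat (by omega)]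
        simp
  rw [hsum]

-- ===== VERDICT (by name: the statement is the Claim_ definition above) =====
theorem calculate_spec : Claim_equal_calculate := by
  intro M S C v _ hv
  unfold Spec_calculate
  exact calc_eq M S C v hv
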